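-- pv_equiv track=rewrite | github.com/crs4/openEHR-tool | myutils/structuredMarand2EHRBase.py | findentriesinex
-- ===== SOURCE A (Python) =====
-- def findentriesinex(extemp,entries):
--     mylist2=[]
--     for e in entries:
--         found=False
--         for k in extemp:
--             if  not found:
--                 ksplit=k.split('/')
--                 if e in ksplit and not ':1' in k and not ':2' in k and not ':3' in k:
--                     # current_app.logger.debug(f'k={k}**************')
--                     kindex=ksplit.index(e)
--                     kpath='/'.join(ksplit[:kindex+1])
--                     # current_app.logger.debug(kpath)
--                     path=kpath
--                     el={}
--                     lastslash=path.rfind('/')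
--                     id=path[lastslash+1:]
--                     if id[-2]==':':
--                         id=id[:-2]
--                     el['id']=id
--                     sel={}
--                     sel[path]=el
--                     mylist2.append(sel)
--                     found=True
--     return mylist2
-- ===== SOURCE B (Python) =====
-- def findentriesinex(extemp, entries):
--     # Precompute: segment -> path prefix of its first occurrence in the first qualifying key.
--     first = {}
--     for k in extemp:
--         if ':1' in k or ':2' in k or ':3' in k:
--             continue
--         pref = []
--         for seg in k.split('/'):
--             pref.append(seg)
--             if seg not in first:
--                 first[seg] = '/'.join(pref)
--     out = []
--     for e in entries:
--         if e in first:
--             path = first[e]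
--             id = path[path.rfind('/') + 1:]
--             if id[-2] == ':':
--                 id = id[:-2]
--             out.append({path: {'id': id}})
--     return out
-- ===== Notes on version B (the rewrite author's own statement) =====
-- stated objective: faster
-- what changed: A rescans and re-splits every template key for every entry; B builds, in one pass over the keys, a dict mapping each segment to the path prefix of its first occurrence in the first qualifying key, then answers each entry with a single dict lookup.
import Mathlib
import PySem

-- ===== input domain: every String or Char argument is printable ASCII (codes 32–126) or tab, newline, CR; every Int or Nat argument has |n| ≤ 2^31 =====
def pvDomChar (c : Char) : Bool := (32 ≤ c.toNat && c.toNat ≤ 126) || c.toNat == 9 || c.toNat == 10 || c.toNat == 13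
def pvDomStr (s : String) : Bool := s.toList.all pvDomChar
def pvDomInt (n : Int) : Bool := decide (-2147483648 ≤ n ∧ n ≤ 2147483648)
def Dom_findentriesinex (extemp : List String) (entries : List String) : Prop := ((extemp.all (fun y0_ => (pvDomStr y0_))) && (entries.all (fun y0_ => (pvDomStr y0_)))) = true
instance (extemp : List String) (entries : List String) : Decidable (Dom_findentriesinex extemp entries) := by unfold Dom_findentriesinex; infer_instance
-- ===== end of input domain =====

-- B replaces A's per-entry rescan of all template keys by a dict (segment -> first
-- qualifying path prefix) built once, then a single dict lookup per entry (objective: faster).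

-- ===== PORT A =====
-- Inner-loop body of A ('for k in extemp' with the 'found' flag); literal.
-- Where Python raises IndexError (id[-2] with len(id) < 2) PySem.Str.pyGet? is none and the
-- port leaves id unchanged; Pre_ excludes exactly those inputs.
def pvAStep (e : String) (st : List (List (String × List (String × String))) × Bool)
    (k : String) : List (List (String × List (String × String))) × Bool :=
  match st with
  | (mylist2, found) =>
    if found then (mylist2, found) else
    let ksplit := (PySem.Str.split? k "/").getD []
    if ksplit.contains e && !(PySem.Str.isIn ":1" k) && !(PySem.Str.isIn ":2" k)
        && !(PySem.Str.isIn ":3" k) then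
      match PySem.List.index? ksplit e with
      | none => (mylist2, found)  -- unreachable: e ∈ ksplit here
      | some kindex =>
        let kpath := PySem.Str.join "/" (PySem.List.slice ksplit none (some ((kindex : Int) + 1)))
        let path := kpath
        let lastslash := PySem.Str.rfind path "/"
        let id := PySem.Str.slice path (some (lastslash + 1)) none
        let id := match PySem.Str.pyGet? id (-2) with
          | some c => if c = ':' then PySem.Str.slice id none (some (-2)) else id
          | none => id  -- Python raises IndexError here (outside Pre_)
        let el := [("id", id)]
        let sel := [(path, el)]
        (mylist2 ++ [sel], true)
    else (mylist2, found)

def findentriesinex (extemp : List String) (entries : List String) :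
    List (List (String × List (String × String))) :=
  entries.foldl (fun mylist2 e => (extemp.foldl (pvAStep e) (mylist2, false)).1) []

-- ===== PORT B =====
-- Per-segment step of B's dict build: extend the running prefix, record the first path.
def pvBSeg (st : List String × PySem.Dict String String) (seg : String) :
    List String × PySem.Dict String String :=
  let pref := st.1 ++ [seg]
  if st.2.contains seg then (pref, st.2)
  else (pref, st.2.insert seg (PySem.Str.join "/" pref))

-- Per-key step of B's dict build ('continue' on keys containing ':1'/':2'/':3').
def pvBKey (first : PySem.Dict String String) (k : String) : PySem.Dict String String :=
  if PySem.Str.isIn ":1" k || PySem.Str.isIn ":2" k || PySem.Str.isIn ":3" k then first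
  else (((PySem.Str.split? k "/").getD []).foldl pvBSeg ([], first)).2

def findentriesinex_alt (extemp : List String) (entries : List String) :
    List (List (String × List (String × String))) :=
  let first := extemp.foldl pvBKey PySem.Dict.empty
  entries.foldl (fun out e =>
    match first.get? e with
    | none => out
    | some path =>
      let id := PySem.Str.slice path (some (PySem.Str.rfind path "/" + 1)) none
      let id := match PySem.Str.pyGet? id (-2) with
        | some c => if c = ':' then PySem.Str.slice id none (some (-2)) else id
        | none => id  -- Python raises IndexError here (outside Pre_)
      out ++ [[(path, [("id", id)])]]) []

-- ===== PRECONDITION & SPEC =====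
-- A key qualifies if it contains none of ':1', ':2', ':3' (A's filter).
def pvQual (k : String) : Bool :=
  !(PySem.Str.isIn ":1" k) && !(PySem.Str.isIn ":2" k) && !(PySem.Str.isIn ":3" k)

-- Pre_ excludes exactly the inputs on which Python A raises IndexError: an entry of
-- length < 2 occurring as a segment of some qualifying template key (id[-2] out of range).
def Pre_findentriesinex (extemp : List String) (entries : List String) : Prop :=
  ∀ e ∈ entries,
    (∃ k ∈ extemp, e ∈ (PySem.Str.split? k "/").getD [] ∧ pvQual k = true) →
    2 ≤ e.toList.length

instance (extemp : List String) (entries : List String) :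
    Decidable (Pre_findentriesinex extemp entries) := by
  unfold Pre_findentriesinex; infer_instance

def pvWitness_findentriesinex : List String × List String := (["ab/cd:0", "ab/x:1"], ["cd:0", "zz"])

def Spec_findentriesinex (extemp : List String) (entries : List String)
    (out : List (List (String × List (String × String)))) : Prop :=
  out = findentriesinex_alt extemp entries

instance (extemp : List String) (entries : List String)
    (out : List (List (String × List (String × String)))) :
    Decidable (Spec_findentriesinex extemp entries out) := by
  unfold Spec_findentriesinex; infer_instance

-- ===== CLAIM (what is proved, stated in full; the proofs are below) =====
def Claim_equal_findentriesinex : Prop :=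
  ∀ (extemp : List String) (entries : List String), Dom_findentriesinex extemp entries →
    Pre_findentriesinex extemp entries →
    Spec_findentriesinex extemp entries (findentriesinex extemp entries)

-- ===== LEMMAS AND PROOFS =====

def pvSplit (k : String) : List String := (PySem.Str.split? k "/").getD []

-- The sel-dict A appends for a found path (identical computation in both ports).
def pvSel (path : String) : List (String × List (String × String)) :=
  let id := PySem.Str.slice path (some (PySem.Str.rfind path "/" + 1)) none
  let id := match PySem.Str.pyGet? id (-2) with
    | some c => if c = ':' then PySem.Str.slice id none (some (-2)) else id
    | none => id
  [(path, [("id", id)])]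

-- A's inner-loop condition, in the port's exact shape.
def pvCond (k e : String) : Bool :=
  (pvSplit k).contains e && !(PySem.Str.isIn ":1" k) && !(PySem.Str.isIn ":2" k)
    && !(PySem.Str.isIn ":3" k)

-- A's per-entry answer: path prefix in the first qualifying key containing e as a segment.
def pvFirst (extemp : List String) (e : String) : Option String :=
  match extemp with
  | [] => none
  | k :: ks =>
    if pvCond k e then
      match PySem.List.index? (pvSplit k) e with
      | some i => some (PySem.Str.join "/" (PySem.List.slice (pvSplit k) none (some ((i : Int) + 1))))
      | none => pvFirst ks e
    else pvFirst ks e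

-- first-occurrence path of e among parts, with accumulated prefix pref
def pvIdxPath (pref parts : List String) (e : String) : Option String :=
  match PySem.List.index? parts e with
  | some i => some (PySem.Str.join "/" (pref ++ parts.take (i + 1)))
  | none => none

theorem pvFirst_cons (k : String) (ks : List String) (e : String) :
    pvFirst (k :: ks) e =
      if pvCond k e then
        match PySem.List.index? (pvSplit k) e with
        | some i => some (PySem.Str.join "/" (PySem.List.slice (pvSplit k) none (some ((i : Int) + 1))))
        | none => pvFirst ks e
      else pvFirst ks e := rfl

theorem pvAStep_found (e k : String) (lst : List (List (String × List (String × String)))) :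
    pvAStep e (lst, true) k = (lst, true) := by
  simp only [pvAStep, if_true]

theorem pvA_fold_true (e : String) (ks : List String)
    (lst : List (List (String × List (String × String)))) :
    ks.foldl (pvAStep e) (lst, true) = (lst, true) := by
  induction ks with
  | nil => rfl
  | cons k ks ih => simpa [pvAStep_found] using ih

theorem pvAStep_false (e k : String) (lst : List (List (String × List (String × String)))) :
    pvAStep e (lst, false) k =
      if pvCond k e then
        match PySem.List.index? (pvSplit k) e with
        | none => (lst, false)
        | some i =>
          (lst ++ [pvSel (PySem.Str.join "/" (PySem.List.slice (pvSplit k) none (some ((i : Int) + 1))))],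
            true)
      else (lst, false) := by
  simp only [pvAStep, pvCond, pvSplit, pvSel, Bool.false_eq_true, if_false]

theorem pvA_fold_false (e : String) (ks : List String) :
    ∀ lst, ks.foldl (pvAStep e) (lst, false) =
      ((match pvFirst ks e with
        | none => lst
        | some p => lst ++ [pvSel p]), (pvFirst ks e).isSome) := by
  induction ks with
  | nil => intro lst; rfl
  | cons k ks ih =>
    intro lst
    show List.foldl (pvAStep e) (pvAStep e (lst, false) k) ks = _
    rw [pvAStep_false, pvFirst_cons]
    by_cases hc : pvCond k e = true
    · rw [if_pos hc, if_pos hc]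
      rcases hidx : PySem.List.index? (pvSplit k) e with _ | i
      · rw [ih lst]
      · rw [pvA_fold_true]
        rfl
    · rw [if_neg hc, if_neg hc]
      exact ih lst

theorem pvBSeg_fold_get (e : String) (parts : List String) :
    ∀ (pref : List String) (d : PySem.Dict String String),
      (parts.foldl pvBSeg (pref, d)).2.get? e = (d.get? e).or (pvIdxPath pref parts e) := by
  induction parts with
  | nil =>
    intro pref d
    simp [pvIdxPath, PySem.List.index?]
  | cons seg parts ih =>
    intro pref d
    show (parts.foldl pvBSeg (pvBSeg (pref, d) seg)).2.get? e = _
    by_cases he : e = seg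
    · subst he
      by_cases hcon : d.contains e
      · have hget : ∃ v, d.get? e = some v := by
          have h1 := PySem.Dict.contains_eq_isSome_get? d e
          rw [hcon] at h1
          exact Option.isSome_iff_exists.mp h1.symm
        obtain ⟨v, hv⟩ := hget
        have h2 : pvBSeg (pref, d) e = (pref ++ [e], d) := by simp [pvBSeg, hcon]
        rw [h2, ih, hv]
        simp
      · have hnone : d.get? e = none := by
          have h1 := PySem.Dict.contains_eq_isSome_get? d e
          rw [Bool.eq_false_iff.mpr hcon] at h1
          simpa [Option.isSome_eq_false_iff] using h1.symm
        have h2 : pvBSeg (pref, d) e =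
            (pref ++ [e], d.insert e (PySem.Str.join "/" (pref ++ [e]))) := by
          simp [pvBSeg, hcon]
        rw [h2, ih, PySem.Dict.get?_insert_self, hnone]
        have h3 : pvIdxPath pref (e :: parts) e = some (PySem.Str.join "/" (pref ++ [e])) := by
          simp only [pvIdxPath]
          rw [PySem.List.index?_cons_self]
          simp
        rw [h3]
        simp
    · have hd' : pvBSeg (pref, d) seg =
        (pref ++ [seg], if d.contains seg then d
          else d.insert seg (PySem.Str.join "/" (pref ++ [seg]))) := by
        simp only [pvBSeg]; split <;> rfl
      have hget' : (if d.contains seg then d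
          else d.insert seg (PySem.Str.join "/" (pref ++ [seg]))).get? e = d.get? e := by
        split
        · rfl
        · exact PySem.Dict.get?_insert_of_ne _ _ he
      rw [hd', ih, hget']
      have hpath : pvIdxPath (pref ++ [seg]) parts e = pvIdxPath pref (seg :: parts) e := by
        simp only [pvIdxPath]
        rw [PySem.List.index?_cons_of_ne parts (Ne.symm he)]
        rcases PySem.List.index? parts e with _ | i
        · rfl
        · simp [List.take_succ_cons]
      rw [hpath]

theorem pvBKey_fold_get (e : String) (ks : List String) :
    ∀ d : PySem.Dict String String,
      (ks.foldl pvBKey d).get? e = (d.get? e).or (pvFirst ks e) := by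
  induction ks with
  | nil => intro d; simp [pvFirst]
  | cons k ks ih =>
    intro d
    show (ks.foldl pvBKey (pvBKey d k)).get? e = _
    rw [pvFirst_cons]
    by_cases hg : (PySem.Str.isIn ":1" k || PySem.Str.isIn ":2" k || PySem.Str.isIn ":3" k) = true
    · have hcond : pvCond k e = false := by
        unfold pvCond
        rcases Bool.or_eq_true_iff.mp hg with h | h
        · rcases Bool.or_eq_true_iff.mp h with h' | h' <;>
            simp only [h', Bool.not_true, Bool.and_false, Bool.false_and]
        · simp only [h, Bool.not_true, Bool.and_false]
      have hkey : pvBKey d k = d := by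
        simp only [pvBKey]; rw [if_pos hg]
      rw [hkey, ih, if_neg (by rw [hcond]; exact Bool.false_ne_true)]
    · simp only [Bool.or_eq_true_iff, not_or, Bool.not_eq_true] at hg
      have hkey : pvBKey d k = ((pvSplit k).foldl pvBSeg ([], d)).2 := by
        simp only [pvBKey, pvSplit]
        rw [if_neg (by rw [hg.1.1, hg.1.2, hg.2]; simp)]
      rw [hkey, ih, pvBSeg_fold_get, Option.or_assoc]
      congr 1
      rcases hidx : PySem.List.index? (pvSplit k) e with _ | i
      · have hmem : e ∉ pvSplit k := (PySem.List.index?_eq_none_iff _ _).mp hidx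
        have hcon : (pvSplit k).contains e = false := by simpa using hmem
        have hcond : pvCond k e = false := by
          unfold pvCond
          simp only [hcon, Bool.false_and]
        rw [if_neg (by rw [hcond]; exact Bool.false_ne_true)]
        simp only [pvIdxPath]
        rw [hidx]
        simp
      · have hmem : e ∈ pvSplit k :=
          (PySem.List.index?_isSome_iff _ _).mp (by rw [hidx]; rfl)
        have hcon : (pvSplit k).contains e = true := List.elem_eq_true_of_mem hmem
        have hcond : pvCond k e = true := by
          unfold pvCond
          rw [hcon, hg.1.1, hg.1.2, hg.2]
          rfl
        have htake : PySem.List.slice (pvSplit k) none (some ((i : Int) + 1)) =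
            (pvSplit k).take (i + 1) := by
          have h1 : ((i : Int) + 1) = ((i + 1 : Nat) : Int) := by push_cast; ring
          rw [h1, PySem.List.slice_to_natCast]
        rw [if_pos hcond]
        simp only [pvIdxPath]
        rw [hidx, htake]
        simp

theorem pvA_eq (extemp entries : List String) :
    findentriesinex extemp entries =
      entries.foldl (fun acc e =>
        match pvFirst extemp e with
        | none => acc
        | some p => acc ++ [pvSel p]) [] := by
  unfold findentriesinex
  apply List.foldl_ext
  intro acc e _
  rw [pvA_fold_false]

theorem pvB_eq (extemp entries : List String) :
    findentriesinex_alt extemp entries =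
      entries.foldl (fun acc e =>
        match pvFirst extemp e with
        | none => acc
        | some p => acc ++ [pvSel p]) [] := by
  unfold findentriesinex_alt
  apply List.foldl_ext
  intro acc e _
  have h : (extemp.foldl pvBKey PySem.Dict.empty).get? e = pvFirst extemp e := by
    rw [pvBKey_fold_get]
    simp
  rw [h]
  rcases pvFirst extemp e with _ | p
  · rfl
  · simp [pvSel]

-- ===== VERDICT (by name: the statement is the Claim_ definition above) =====
theorem findentriesinex_spec : Claim_equal_findentriesinex := by
  intro extemp entries _ _
  unfold Spec_findentriesinex
  rw [pvA_eq, pvB_eq]
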